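-- pv_equiv track=rewrite | github.com/TheNitromeFan/baekjoon | 18209.py | parse
-- ===== SOURCE A (Python) =====
-- import string
--
-- def parse(word):
--     ret = ""
--     for c in word:
--         if c in "um":
--             ret += c
--         elif c in string.ascii_letters + string.digits:
--             return None
--     return ret
-- ===== SOURCE B (Python) =====
-- import string
--
-- _REJECT = set(string.ascii_letters + string.digits) - set("um")
--
-- def parse(word):
--     if any(c in _REJECT for c in word):
--         return None
--     return "".join(c for c in word if c in "um")
-- ===== Notes on version B (the rewrite author's own statement) =====
-- stated objective: idiomatic
-- what changed: Replaces the single accumulating loop with early return by a precomputed reject set, an any() validation pass, and a join-of-generator extraction pass.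
import Mathlib
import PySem

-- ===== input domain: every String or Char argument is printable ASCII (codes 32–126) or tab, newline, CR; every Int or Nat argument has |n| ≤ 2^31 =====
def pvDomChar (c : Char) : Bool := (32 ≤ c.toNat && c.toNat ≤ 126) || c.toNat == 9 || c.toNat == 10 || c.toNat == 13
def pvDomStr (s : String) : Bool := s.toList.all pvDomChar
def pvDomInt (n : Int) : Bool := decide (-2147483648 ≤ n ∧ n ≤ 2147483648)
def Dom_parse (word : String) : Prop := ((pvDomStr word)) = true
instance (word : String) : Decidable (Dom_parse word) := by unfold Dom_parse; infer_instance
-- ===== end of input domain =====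

-- B splits A's single accumulating loop (early return None on other ASCII alphanumerics)
-- into a validation pass against a reject predicate followed by a filter/join extraction pass.

-- ===== PORT A =====
-- c in "um"
def pvIsUM (c : Char) : Bool := c == 'u' || c == 'm'
-- c in string.ascii_letters + string.digits (ASCII only, exact)
def pvIsAlnum (c : Char) : Bool :=
  ('a' ≤ c && c ≤ 'z') || ('A' ≤ c && c ≤ 'Z') || ('0' ≤ c && c ≤ '9')

-- the for-loop of A, carrying ret as a list of chars
def parseGo : List Char → List Char → Option (List Char)
  | [], ret => some ret
  | c :: cs, ret =>
    if pvIsUM c then parseGo cs (ret ++ [c])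
    else if pvIsAlnum c then none
    else parseGo cs ret

def parse (word : String) : Option String :=
  (parseGo word.toList []).map String.ofList

-- ===== PORT B =====
-- membership in the precomputed reject set: ASCII alnum and not 'u'/'m'
def pvReject (c : Char) : Bool := pvIsAlnum c && !(c == 'u' || c == 'm')

def parse_alt (word : String) : Option String :=
  let cs := word.toList
  if cs.any pvReject then none
  else some (String.ofList (cs.filter (fun c => c == 'u' || c == 'm')))

-- ===== PRECONDITION & SPEC =====
def Spec_parse (word : String) (out : Option String) : Prop := out = parse_alt word
instance (word : String) (out : Option String) : Decidable (Spec_parse word out) := by unfold Spec_parse; infer_instance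

-- ===== CLAIM (what is proved, stated in full; the proofs are below) =====
def Claim_equal_parse : Prop := ∀ (word : String), Dom_parse word → Spec_parse word (parse word)

-- ===== LEMMAS AND PROOFS =====
theorem parseGo_eq (cs : List Char) : ∀ ret,
    parseGo cs ret =
      if cs.any pvReject then none
      else some (ret ++ cs.filter (fun c => c == 'u' || c == 'm')) := by
  induction cs with
  | nil => intro ret; simp [parseGo]
  | cons c cs ih =>
    intro ret
    by_cases hum : pvIsUM c
    · have hrej : pvReject c = false := by
        simp [pvReject, pvIsUM] at *
        rcases hum with h | h <;> simp [h]
      have hum' : (c == 'u' || c == 'm') = true := by simpa [pvIsUM] using hum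
      simp [parseGo, hum, ih, hrej, hum']
    · by_cases hal : pvIsAlnum c
      · have hrej : pvReject c = true := by
          simp [pvReject, pvIsUM] at *
          exact ⟨hal, hum⟩
        simp [parseGo, hum, hal, hrej]
      · have hrej : pvReject c = false := by simp [pvReject, hal]
        have hum' : (c == 'u' || c == 'm') = false := by simpa [pvIsUM] using hum
        simp [parseGo, hum, hal, ih, hrej, hum']

-- ===== VERDICT (by name: the statement is the Claim_ definition above) =====
theorem parse_spec : Claim_equal_parse := by
  intro word _
  unfold Spec_parse parse parse_alt
  rw [parseGo_eq]
  by_cases h : word.toList.any pvReject <;> simp [h]
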